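-- pv_equiv track=rewrite | github.com/myylogic/cevahir-ai | cognitive_management/v2/utils/context_pruning.py | _keyword_bag
-- ===== SOURCE A (Python) =====
-- from typing import Any, Dict, Iterable, List, Optional, Tuple
--
-- def _keyword_bag(text: str) -> List[str]:
--     # Çok basit bir anahtar kelime torbası: harf/rakam, 2+ uzunluk, küçük harf
--     out: List[str] = []
--     cur = []
--     for ch in text.lower():
--         if ch.isalnum() or ch in ("_", "-"):
--             cur.append(ch)
--         else:
--             if len(cur) >= 2:
--                 out.append("".join(cur))
--             cur = []
--     if len(cur) >= 2:
--         out.append("".join(cur))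
--     return out
-- ===== SOURCE B (Python) =====
-- def _keyword_bag(text):
--     # Two-pointer run scan over the lowered text: jump over each maximal
--     # keyword run with an inner index loop instead of a char buffer + flush.
--     s = text.lower()
--     n = len(s)
--     tokens = []
--     i = 0
--     while i < n:
--         if s[i].isalnum() or s[i] in "_-":
--             j = i
--             while j < n and (s[j].isalnum() or s[j] in "_-"):
--                 j += 1
--             if j - i >= 2:
--                 tokens.append(s[i:j])
--             i = j
--         else:
--             i += 1
--     return tokens
-- ===== Notes on version B (the rewrite author's own statement) =====
-- stated objective: alternative
-- what changed: Replaces the char-buffer accumulator with a per-character flush branch and a trailing flush by a two-pointer scan that jumps over each maximal keyword run and slices it out, with no pending buffer or post-loop flush.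
import Mathlib
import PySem

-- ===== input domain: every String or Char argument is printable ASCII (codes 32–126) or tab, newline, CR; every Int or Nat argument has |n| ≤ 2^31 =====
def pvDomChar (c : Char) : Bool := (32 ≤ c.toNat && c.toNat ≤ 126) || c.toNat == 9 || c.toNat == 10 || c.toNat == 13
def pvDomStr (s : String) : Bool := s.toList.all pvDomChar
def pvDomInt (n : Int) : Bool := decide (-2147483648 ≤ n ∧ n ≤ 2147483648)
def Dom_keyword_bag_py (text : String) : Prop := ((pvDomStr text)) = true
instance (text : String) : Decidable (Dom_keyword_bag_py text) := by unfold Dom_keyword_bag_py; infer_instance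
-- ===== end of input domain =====

-- B replaces A's char buffer + flush branches with a two-pointer maximal-run scan (same cost, different decomposition).
-- ===== PORT A =====
def pvKeep (c : Char) : Bool := PySem.Chars.isalnum c || c == '_' || c == '-'

def pvFlush (cur : List Char) : List String :=
  if cur.length ≥ 2 then [String.ofList cur] else []

def keyword_bag_py (text : String) : List String :=
  let st := (PySem.Str.lower text).toList.foldl
    (fun (st : List String × List Char) c =>
      if pvKeep c then (st.1, st.2 ++ [c])
      else (st.1 ++ pvFlush st.2, []))
    ([], [])
  st.1 ++ pvFlush st.2

-- ===== PORT B =====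
-- two-pointer scan of Source B: takeWhile/dropWhile realise the inner "advance j over the run" loop
def pvAltGo : List Char → List String
  | [] => []
  | c :: cs =>
    if pvKeep c then
      (pvFlush ((c :: cs).takeWhile pvKeep)) ++ pvAltGo ((c :: cs).dropWhile pvKeep)
    else pvAltGo cs
termination_by l => l.length
decreasing_by
  · simp only [List.dropWhile_cons, *, if_pos, List.length_cons]
    exact Nat.lt_succ_of_le (List.length_dropWhile_le pvKeep cs)
  · simp

def keyword_bag_py_alt (text : String) : List String :=
  pvAltGo (PySem.Str.lower text).toList

-- ===== PRECONDITION & SPEC =====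
def Spec_keyword_bag_py (text : String) (out : List String) : Prop := out = keyword_bag_py_alt text
instance (text : String) (out : List String) : Decidable (Spec_keyword_bag_py text out) := by unfold Spec_keyword_bag_py; infer_instance

-- ===== CLAIM (what is proved, stated in full; the proofs are below) =====
def Claim_equal_keyword_bag_py : Prop := ∀ (text : String), Dom_keyword_bag_py text → Spec_keyword_bag_py text (keyword_bag_py text)

-- ===== LEMMAS AND PROOFS =====
-- A's loop with pending buffer cur, written forward (used only in the proof)
def pvMid (cur : List Char) : List Char → List String
  | [] => pvFlush cur
  | c :: cs => if pvKeep c then pvMid (cur ++ [c]) cs else pvFlush cur ++ pvMid [] cs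

lemma pvAltGo_span (l : List Char) :
    pvFlush (l.takeWhile pvKeep) ++ pvAltGo (l.dropWhile pvKeep) = pvAltGo l := by
  cases l with
  | nil => simp [pvFlush]
  | cons c cs =>
    by_cases h : pvKeep c = true
    · conv_rhs => rw [pvAltGo.eq_def]
      simp [h]
    · simp [h, pvFlush]

lemma pvMid_eq (l : List Char) (cur : List Char) :
    pvMid cur l = pvFlush (cur ++ l.takeWhile pvKeep) ++ pvAltGo (l.dropWhile pvKeep) := by
  induction l generalizing cur with
  | nil => rw [pvAltGo.eq_def]; simp [pvMid]
  | cons c cs ih =>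
    by_cases h : pvKeep c = true
    · simp [pvMid, h, ih]
    · simp only [pvMid, h, Bool.false_eq_true, ite_false, List.takeWhile_cons,
        List.dropWhile_cons, List.append_nil, ih [], List.nil_append]
      rw [pvAltGo_span cs]
      conv_rhs => rw [pvAltGo.eq_def]
      simp [h]

lemma pvFoldl_eq (l : List Char) (out : List String) (cur : List Char) :
    (let st := l.foldl
        (fun (st : List String × List Char) c =>
          if pvKeep c then (st.1, st.2 ++ [c])
          else (st.1 ++ pvFlush st.2, []))
        (out, cur)
     st.1 ++ pvFlush st.2) = out ++ pvMid cur l := by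
  induction l generalizing out cur with
  | nil => simp [pvMid]
  | cons c cs ih =>
    by_cases h : pvKeep c = true
    · simpa [h, pvMid] using ih out (cur ++ [c])
    · simp only [List.foldl_cons, h, if_neg, Bool.false_eq_true, not_false_eq_true]
      rw [ih]
      simp [pvMid, h]

lemma pvAltGo_eq_mid (l : List Char) : pvAltGo l = pvMid [] l := by
  rw [pvMid_eq, List.nil_append, pvAltGo_span]

-- ===== VERDICT =====
theorem keyword_bag_py_spec : Claim_equal_keyword_bag_py := by
  intro text _
  unfold Spec_keyword_bag_py keyword_bag_py keyword_bag_py_alt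
  rw [pvFoldl_eq, pvAltGo_eq_mid]
  simp
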